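-- pv_equiv track=rewrite | github.com/bartmanski/Sztuczna-Inteligencja | Lista 1/zad5.py | HasZerosBetweenOnes
-- ===== SOURCE A (Python) =====
-- def HasZerosBetweenOnes(row):
--     ones = False
--     for i in range(len(row)):
--         if row[i] == 1:
--             ones = True
--         if row[i] == 0 and ones:
--             return True
--     return False
-- ===== SOURCE B (Python) =====
-- def HasZerosBetweenOnes(row):
--     if 1 not in row:
--         return False
--     idx = row.index(1)
--     return any(v == 0 for v in row[idx + 1:])
-- ===== Notes on version B (the rewrite author's own statement) =====
-- stated objective: idiomatic
-- what changed: Replaced the flag-carrying single pass with a locate-first-1 (list.index) then any-zero-in-suffix scan.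
import Mathlib
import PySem

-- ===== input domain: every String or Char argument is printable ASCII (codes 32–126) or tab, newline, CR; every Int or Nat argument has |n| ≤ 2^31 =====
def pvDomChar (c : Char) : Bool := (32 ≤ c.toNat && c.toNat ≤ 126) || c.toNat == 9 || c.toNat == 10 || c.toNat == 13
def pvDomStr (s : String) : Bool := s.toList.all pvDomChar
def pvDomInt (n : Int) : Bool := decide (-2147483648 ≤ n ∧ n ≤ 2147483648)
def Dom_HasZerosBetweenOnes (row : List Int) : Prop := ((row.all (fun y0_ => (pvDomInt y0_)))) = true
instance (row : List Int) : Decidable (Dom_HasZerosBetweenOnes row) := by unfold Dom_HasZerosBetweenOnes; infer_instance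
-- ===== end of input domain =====

-- B replaces A's flag-carrying single pass with an idiomatic locate-first-1 then any-zero-in-suffix scan (same O(n) cost).

-- ===== PORT A =====
-- A's indexed loop over range(len(row)) with the `ones` flag, ported as structural
-- recursion carrying the flag; early `return True` becomes the true branch.
def HasZerosBetweenOnes.go : List Int → Bool → Bool
  | [], _ => false
  | x :: xs, ones =>
    let ones' := if x == 1 then true else ones
    if x == 0 && ones' then true else HasZerosBetweenOnes.go xs ones'

def HasZerosBetweenOnes (row : List Int) : Bool :=
  HasZerosBetweenOnes.go row false

-- ===== PORT B =====
def HasZerosBetweenOnes_alt (row : List Int) : Bool :=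
  match PySem.List.index? row 1 with
  | none => false
  | some idx => (PySem.List.slice row (some ((idx : Int) + 1)) none).any (fun v => v == 0)

-- ===== PRECONDITION & SPEC =====
def Spec_HasZerosBetweenOnes (row : List Int) (out : Bool) : Prop := out = HasZerosBetweenOnes_alt row
instance (row : List Int) (out : Bool) : Decidable (Spec_HasZerosBetweenOnes row out) := by unfold Spec_HasZerosBetweenOnes; infer_instance

-- ===== CLAIM (what is proved, stated in full; the proofs are below) =====
def Claim_equal_HasZerosBetweenOnes : Prop := ∀ (row : List Int), Dom_HasZerosBetweenOnes row → Spec_HasZerosBetweenOnes row (HasZerosBetweenOnes row)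

-- ===== LEMMAS AND PROOFS =====

-- Once the flag is set, A's loop just scans for a zero.
theorem go_true_eq_any (xs : List Int) :
    HasZerosBetweenOnes.go xs true = xs.any (fun v => v == 0) := by
  induction xs with
  | nil => rfl
  | cons x xs ih =>
    simp only [HasZerosBetweenOnes.go, List.any_cons]
    by_cases h0 : x = 0
    · simp [h0]
    · simp [h0, ih]
    
theorem go_false_eq_alt (xs : List Int) :
    HasZerosBetweenOnes.go xs false = HasZerosBetweenOnes_alt xs := by
  induction xs with
  | nil => rfl
  | cons x xs ih =>
    by_cases h1 : x = 1
    · subst h1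
      simp only [HasZerosBetweenOnes.go, HasZerosBetweenOnes_alt,
        PySem.List.index?_cons_self]
      have : PySem.List.slice ((1 : Int) :: xs) (some ((0 : Nat) + 1 : Int)) none = xs := by
        have := PySem.List.slice_from_natCast ((1:Int) :: xs) 1
        simpa using this
      rw [this]
      simp [go_true_eq_any]
    · simp only [HasZerosBetweenOnes.go, HasZerosBetweenOnes_alt]
      rw [show PySem.List.index? (x :: xs) 1 = (PySem.List.index? xs 1).map (· + 1) from
        PySem.List.index?_cons_of_ne _ h1]
      have hx1 : (x == (1:Int)) = false := by simp [h1]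
      have hx0 : (x == 0 && false) = false := by simp
      rw [hx1]
      simp only [if_neg (by simp : ¬ (false = true))]
      rw [ih]
      unfold HasZerosBetweenOnes_alt
      cases hidx : PySem.List.index? xs 1 with
      | none => simp
      | some i =>
        simp only [Option.map_some]
        have hl : PySem.List.slice (x :: xs) (some (((i : Nat) : Int) + 1 + 1)) none
            = PySem.List.slice xs (some (((i : Nat) : Int) + 1)) none := by
          have h1' := PySem.List.slice_from_natCast (x :: xs) (i + 2)
          have h2' := PySem.List.slice_from_natCast xs (i + 1)
          push_cast at h1' h2'
          rw [show ((i:Int) + 1 + 1) = ((i:Int) + 2) by ring, h1', h2']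
          rfl
        rw [show (((i + 1 : Nat) : Int) + 1) = (((i : Nat) : Int) + 1 + 1) by push_cast; ring, hl]
        simp

-- ===== VERDICT (by name: the statement is the Claim_ definition above) =====
theorem HasZerosBetweenOnes_spec : Claim_equal_HasZerosBetweenOnes := by
  intro row _
  unfold Spec_HasZerosBetweenOnes HasZerosBetweenOnes
  exact go_false_eq_alt row
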